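-- pv_equiv track=rewrite | github.com/malindullinger/caloo-crawler | src/canonicalize/tagging.py | _match_vocab
-- ===== SOURCE A (Python) =====
-- def _match_vocab(text: str, vocab: dict[str, list[str]]) -> list[str]:
--     """Return sorted tag keys whose vocabulary has at least one keyword hit."""
--     tags: list[str] = []
--     for tag in sorted(vocab):  # sorted keys → deterministic output
--         for kw in vocab[tag]:
--             if kw in text:
--                 tags.append(tag)
--                 break
--     return tags
-- ===== SOURCE B (Python) =====
-- def _match_vocab(text: str, vocab: dict[str, list[str]]) -> list[str]:
--     """Multi-pattern search by length groups: group the keywords by length,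
--     slide a window of each distinct length across the text once collecting
--     the keywords that actually occur, then filter and sort the tags.
--     One O(1) set probe per (position, distinct length) instead of one full
--     substring search of the text per keyword."""
--     by_len = {}
--     for kws in vocab.values():
--         for kw in kws:
--             by_len.setdefault(len(kw), set()).add(kw)
--     present = set()
--     for length, group in by_len.items():
--         for i in range(len(text) - length + 1):
--             window = text[i:i + length]
--             if window in group:
--                 present.add(window)
--     return sorted(tag for tag, kws in vocab.items()
--                   if any(kw in present for kw in kws))
-- ===== Notes on version B (the rewrite author's own statement) =====
-- stated objective: faster
-- what changed: A loops over the sorted tags and runs a full substring search of the text for every keyword; B groups the keywords by length once, slides a window of each distinct length across the text collecting the keywords that occur via set probes, then filters the tags against that set and sorts.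
import Mathlib
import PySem

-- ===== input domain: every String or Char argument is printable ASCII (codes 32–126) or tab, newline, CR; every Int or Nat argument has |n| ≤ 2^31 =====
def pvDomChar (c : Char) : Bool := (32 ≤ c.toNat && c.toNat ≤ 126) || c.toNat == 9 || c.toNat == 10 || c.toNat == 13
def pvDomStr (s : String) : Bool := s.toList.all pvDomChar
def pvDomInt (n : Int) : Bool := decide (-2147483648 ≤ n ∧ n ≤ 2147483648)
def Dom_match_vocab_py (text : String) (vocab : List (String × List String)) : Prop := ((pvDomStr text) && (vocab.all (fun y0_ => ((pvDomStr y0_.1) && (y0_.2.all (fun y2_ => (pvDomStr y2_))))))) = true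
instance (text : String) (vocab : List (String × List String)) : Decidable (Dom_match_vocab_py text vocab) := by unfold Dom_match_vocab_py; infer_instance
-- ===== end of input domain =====

-- B replaces A's per-keyword substring searches with multi-pattern search by length groups:
-- keywords are grouped by length once, a window of each distinct length slides over the text
-- collecting the keywords that occur, and the tags are filtered against that set and sorted.


-- ===== PORT A =====
-- inner 'for kw in vocab[tag]: if kw in text: … break' loop: true as soon as a keyword hits
def pvHitLoop (text : String) : List String → Bool
  | [] => false
  | kw :: rest => if PySem.Str.isIn kw text then true else pvHitLoop text rest

def match_vocab_py (text : String) (vocab : List (String × List String)) : List String :=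
  let d := PySem.Dict.ofList vocab
  (PySem.List.sorted d.keys (fun x => x) false).foldl
    (fun tags tag => if pvHitLoop text (d.getD tag []) then tags ++ [tag] else tags) []

-- ===== PORT B =====
-- first loop of Source B: 'for kws in vocab.values(): for kw in kws: by_len.setdefault(len(kw), set()).add(kw)'
def pvByLen (valss : List (List String)) : PySem.Dict Int (PySem.Set String) :=
  valss.foldl
    (fun bl kws => kws.foldl
      (fun (bl : PySem.Dict Int (PySem.Set String)) kw =>
        bl.modify (PySem.Str.len kw) PySem.Set.empty (fun g => PySem.Set.add g kw)) bl)
    PySem.Dict.empty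

-- second loop of Source B: 'for length, group in by_len.items(): for i in range(len(text) - length + 1):
--   window = text[i:i + length]; if window in group: present.add(window)'
-- (the Python local 'window' is written out at both of its uses)
def pvPresent (text : String) (bl : PySem.Dict Int (PySem.Set String)) : PySem.Set String :=
  bl.items.foldl
    (fun pres lg =>
      (PySem.List.pyRange 0 (PySem.Str.len text - lg.1 + 1) 1).foldl
        (fun (pres : PySem.Set String) i =>
          if PySem.Set.contains lg.2 (PySem.Str.slice text (some i) (some (i + lg.1)))
          then PySem.Set.add pres (PySem.Str.slice text (some i) (some (i + lg.1)))
          else pres)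
        pres)
    PySem.Set.empty

-- 'sorted(tag for tag, kws in vocab.items() if any(kw in present for kw in kws))'
def match_vocab_py_alt (text : String) (vocab : List (String × List String)) : List String :=
  PySem.List.sorted
    (((PySem.Dict.ofList vocab).items.filter
        (fun pr => pr.2.any
          (fun kw => PySem.Set.contains
            (pvPresent text (pvByLen (PySem.Dict.ofList vocab).values)) kw))).map (·.1))
    (fun x => x) false

-- ===== PRECONDITION & SPEC =====
def Spec_match_vocab_py (text : String) (vocab : List (String × List String)) (out : List String) : Prop := out = match_vocab_py_alt text vocab
instance (text : String) (vocab : List (String × List String)) (out : List String) : Decidable (Spec_match_vocab_py text vocab out) := by unfold Spec_match_vocab_py; infer_instance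

-- ===== CLAIM (what is proved, stated in full; the proofs are below) =====
def Claim_equal_match_vocab_py : Prop := ∀ (text : String) (vocab : List (String × List String)), Dom_match_vocab_py text vocab → Spec_match_vocab_py text vocab (match_vocab_py text vocab)

-- ===== LEMMAS AND PROOFS =====

-- A's break loop computes any()
theorem pvHitLoop_eq_any (text : String) (kws : List String) :
    pvHitLoop text kws = kws.any (fun kw => PySem.Str.isIn kw text) := by
  induction kws with
  | nil => rfl
  | cons kw rest ih => simp [pvHitLoop, ih]

-- one keyword list into the by-length index: group membership
theorem pvByLenInner (kws : List String) (bl : PySem.Dict Int (PySem.Set String))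
    (L : Int) (kw : String) :
    kw ∈ (kws.foldl
        (fun (bl : PySem.Dict Int (PySem.Set String)) kw =>
          bl.modify (PySem.Str.len kw) PySem.Set.empty (fun g => PySem.Set.add g kw)) bl).getD L PySem.Set.empty
      ↔ kw ∈ bl.getD L PySem.Set.empty ∨ (PySem.Str.len kw = L ∧ kw ∈ kws) := by
  induction kws generalizing bl with
  | nil => simp
  | cons kw0 rest ih =>
    rw [List.foldl_cons, ih]
    rw [PySem.Dict.getD_modify]
    by_cases hL : L = PySem.Str.len kw0
    · subst hL
      rw [if_pos rfl, PySem.Set.mem_add]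
      simp only [List.mem_cons]
      constructor
      · rintro ((hm | rfl) | hm)
        · exact Or.inl hm
        · exact Or.inr ⟨rfl, Or.inl rfl⟩
        · exact Or.inr ⟨hm.1, Or.inr hm.2⟩
      · rintro (hm | ⟨hlen, rfl | hm⟩)
        · exact Or.inl (Or.inl hm)
        · exact Or.inl (Or.inr rfl)
        · exact Or.inr ⟨hlen, hm⟩
    · rw [if_neg hL]
      simp only [List.mem_cons]
      constructor
      · rintro (hm | hm)
        · exact Or.inl hm
        · exact Or.inr ⟨hm.1, Or.inr hm.2⟩
      · rintro (hm | ⟨hlen, rfl | hm⟩)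
        · exact Or.inl hm
        · exact absurd (hlen ▸ rfl) hL
        · exact Or.inr ⟨hlen, hm⟩

-- one keyword list into the by-length index: key set
theorem pvByLenInnerKeys (kws : List String) (bl : PySem.Dict Int (PySem.Set String))
    (L : Int) :
    L ∈ (kws.foldl
        (fun (bl : PySem.Dict Int (PySem.Set String)) kw =>
          bl.modify (PySem.Str.len kw) PySem.Set.empty (fun g => PySem.Set.add g kw)) bl).keys
      ↔ L ∈ bl.keys ∨ ∃ kw ∈ kws, PySem.Str.len kw = L := by
  induction kws generalizing bl with
  | nil => simp
  | cons kw0 rest ih =>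
    rw [List.foldl_cons, ih, PySem.Dict.keys_modify, PySem.Dict.mem_keys_insert]
    simp only [List.mem_cons, exists_eq_or_imp]
    tauto

-- the whole by-length index build: group membership
theorem pvByLenOuter (valss : List (List String)) (bl : PySem.Dict Int (PySem.Set String))
    (L : Int) (kw : String) :
    kw ∈ (valss.foldl
        (fun bl kws => kws.foldl
          (fun (bl : PySem.Dict Int (PySem.Set String)) kw =>
            bl.modify (PySem.Str.len kw) PySem.Set.empty (fun g => PySem.Set.add g kw)) bl) bl).getD L PySem.Set.empty
      ↔ kw ∈ bl.getD L PySem.Set.empty ∨ (PySem.Str.len kw = L ∧ ∃ kws ∈ valss, kw ∈ kws) := by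
  induction valss generalizing bl with
  | nil => simp
  | cons kws rest ih =>
    rw [List.foldl_cons, ih, pvByLenInner]
    simp only [List.mem_cons, exists_eq_or_imp]
    tauto

-- the whole by-length index build: key set
theorem pvByLenOuterKeys (valss : List (List String)) (bl : PySem.Dict Int (PySem.Set String))
    (L : Int) :
    L ∈ (valss.foldl
        (fun bl kws => kws.foldl
          (fun (bl : PySem.Dict Int (PySem.Set String)) kw =>
            bl.modify (PySem.Str.len kw) PySem.Set.empty (fun g => PySem.Set.add g kw)) bl) bl).keys
      ↔ L ∈ bl.keys ∨ ∃ kws ∈ valss, ∃ kw ∈ kws, PySem.Str.len kw = L := by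
  induction valss generalizing bl with
  | nil => simp
  | cons kws rest ih =>
    rw [List.foldl_cons, ih, pvByLenInnerKeys]
    simp only [List.mem_cons, exists_eq_or_imp]
    exact or_assoc

-- the by-length index keeps its keys Nodup
theorem pvByLenNodup (valss : List (List String)) (bl : PySem.Dict Int (PySem.Set String))
    (h : bl.keys.Nodup) :
    (valss.foldl
        (fun bl kws => kws.foldl
          (fun (bl : PySem.Dict Int (PySem.Set String)) kw =>
            bl.modify (PySem.Str.len kw) PySem.Set.empty (fun g => PySem.Set.add g kw)) bl) bl).keys.Nodup := by
  induction valss generalizing bl with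
  | nil => exact h
  | cons kws rest ih =>
    rw [List.foldl_cons]
    exact ih _ (PySem.Dict.nodup_keys_foldl_modify_key kws PySem.Str.len PySem.Set.empty
      (fun _ kw g => PySem.Set.add g kw) bl h)

-- the window scan for one length group
theorem pvPresentInner (g : PySem.Set String) (w : Int → String) (l : List Int)
    (pres : PySem.Set String) (y : String) :
    y ∈ l.foldl
        (fun (pres : PySem.Set String) i =>
          if PySem.Set.contains g (w i) then PySem.Set.add pres (w i) else pres) pres
      ↔ y ∈ pres ∨ ∃ i ∈ l, PySem.Set.contains g (w i) = true ∧ y = w i := by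
  induction l generalizing pres with
  | nil => simp
  | cons i rest ih =>
    have hstep : y ∈ (if PySem.Set.contains g (w i)
          then PySem.Set.add pres (w i) else pres)
        ↔ y ∈ pres ∨ (PySem.Set.contains g (w i) = true ∧ y = w i) := by
      split_ifs with hif
      · rw [PySem.Set.mem_add]; tauto
      · constructor
        · exact Or.inl
        · rintro (hy | ⟨hc, _⟩)
          · exact hy
          · exact absurd hc hif
    simp only [List.foldl_cons, ih, hstep, List.mem_cons, exists_eq_or_imp]
    tauto

-- the whole window scan over all length groups
theorem pvPresentOuter (w : Int × PySem.Set String → Int → String)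
    (r : Int × PySem.Set String → List Int) (l : List (Int × PySem.Set String))
    (pres : PySem.Set String) (y : String) :
    y ∈ l.foldl
        (fun pres lg => (r lg).foldl
          (fun (pres : PySem.Set String) i =>
            if PySem.Set.contains lg.2 (w lg i) then PySem.Set.add pres (w lg i) else pres) pres) pres
      ↔ y ∈ pres ∨ ∃ lg ∈ l, ∃ i ∈ r lg, PySem.Set.contains lg.2 (w lg i) = true ∧ y = w lg i := by
  induction l generalizing pres with
  | nil => simp
  | cons lg rest ih =>
    simp only [List.foldl_cons, ih, pvPresentInner, List.mem_cons, exists_eq_or_imp]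
    exact or_assoc

-- a keyword of length L occurs in the text iff some window of length L equals it
theorem pvWindowIff (text : String) (kw : String) (L : Int)
    (hL : PySem.Str.len kw = L) :
    (∃ i ∈ PySem.List.pyRange 0 (PySem.Str.len text - L + 1) 1,
        PySem.Str.slice text (some i) (some (i + L)) = kw)
      ↔ PySem.Chars.isIn kw.toList text.toList = true := by
  have hCL : ∀ (l : List Char) (a b : Option Int),
      PySem.Chars.slice l a b = PySem.List.slice l a b := fun _ _ _ => rfl
  rw [← PySem.Chars.exists_prefix_drop_iff_isIn]
  rw [PySem.Str.len_eq] at hL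
  have hL0 : 0 ≤ L := by omega
  constructor
  · rintro ⟨i, hi, hslice⟩
    rw [PySem.List.mem_pyRange_one, PySem.Str.len_eq] at hi
    obtain ⟨hi0, hiu⟩ := hi
    have h1 : kw.toList = (text.toList.drop i.toNat).take L.toNat := by
      rw [← hslice, PySem.Str.toList_slice, hCL,
        PySem.List.slice_toNat text.toList hi0 (by omega)]
      congr 1
      omega
    exact ⟨i.toNat, by rw [h1]; exact List.take_prefix _ _⟩
  · rintro ⟨j, hp⟩
    by_cases hkw : kw.toList = []
    · have hL0' : L = 0 := by rw [← hL, hkw]; rfl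
      refine ⟨0, ?_, ?_⟩
      · rw [PySem.List.mem_pyRange_one, PySem.Str.len_eq]
        have : (0 : Int) ≤ (text.toList.length : Int) := by positivity
        omega
      · rw [← String.toList_inj, PySem.Str.toList_slice, hCL, hL0', add_zero]
        rw [PySem.List.slice_toNat text.toList le_rfl le_rfl]
        simp [hkw]
    · have hj : j ≤ text.toList.length := by
        by_contra hcon
        push_neg at hcon
        rw [List.drop_eq_nil_of_le (by omega)] at hp
        exact hkw (List.prefix_nil.mp hp)
      have hlen : kw.toList.length ≤ text.toList.length - j := by
        simpa using hp.length_le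
      refine ⟨(j : Int), ?_, ?_⟩
      · rw [PySem.List.mem_pyRange_one, PySem.Str.len_eq]
        have hkwpos : 0 < kw.toList.length := List.length_pos_iff.mpr hkw
        omega
      · rw [← String.toList_inj, PySem.Str.toList_slice, hCL,
          PySem.List.slice_toNat text.toList (by omega) (by omega)]
      
        have h2 : ((j : Int) + L).toNat - ((j : Int)).toNat = kw.toList.length := by omega
        rw [h2]
        have h3 : (↑j : Int).toNat = j := Int.toNat_natCast j
        rw [h3]
        exact (List.prefix_iff_eq_take.mp hp).symm

-- the by-length index, characterised
theorem pvByLenMem (valss : List (List String)) (L : Int) (kw : String) :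
    kw ∈ (pvByLen valss).getD L PySem.Set.empty
      ↔ PySem.Str.len kw = L ∧ ∃ kws ∈ valss, kw ∈ kws := by
  unfold pvByLen
  rw [pvByLenOuter]
  simp [PySem.Dict.getD_empty, PySem.Set.empty]

theorem pvByLenKeys (valss : List (List String)) (L : Int) :
    L ∈ (pvByLen valss).keys ↔ ∃ kws ∈ valss, ∃ kw ∈ kws, PySem.Str.len kw = L := by
  unfold pvByLen
  rw [pvByLenOuterKeys]
  simp

theorem pvByLenKeysNodup (valss : List (List String)) : (pvByLen valss).keys.Nodup := by
  unfold pvByLen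
  exact pvByLenNodup valss PySem.Dict.empty (by simp)

-- what the window scan collects: exactly the keywords of the vocabulary occurring in the text
theorem pvPresentContains (text : String) (valss : List (List String)) (kw : String) :
    PySem.Set.contains (pvPresent text (pvByLen valss)) kw = true
      ↔ (∃ kws ∈ valss, kw ∈ kws) ∧ PySem.Chars.isIn kw.toList text.toList = true := by
  rw [PySem.Set.contains_iff]
  unfold pvPresent
  rw [pvPresentOuter]
  constructor
  · rintro (h0 | ⟨lg, hlg, i, hi, hcont, rfl⟩)
    · simp [PySem.Set.empty] at h0
    · rw [PySem.Dict.items_eq_map_keys _ (pvByLenKeysNodup valss) PySem.Set.empty] at hlg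
      obtain ⟨L, hLk, rfl⟩ := List.mem_map.mp hlg
      have hw := (PySem.Set.contains_iff _ _).mp hcont
      obtain ⟨hlen, hkws⟩ := (pvByLenMem valss L _).mp hw
      exact ⟨hkws, (pvWindowIff text _ L hlen).mp ⟨i, hi, rfl⟩⟩
  · rintro ⟨⟨kws, hkws, hkw⟩, hin⟩
    have hLk : PySem.Str.len kw ∈ (pvByLen valss).keys :=
      (pvByLenKeys valss _).mpr ⟨kws, hkws, kw, hkw, rfl⟩
    have hlg : (PySem.Str.len kw, (pvByLen valss).getD (PySem.Str.len kw) PySem.Set.empty)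
        ∈ (pvByLen valss).items := by
      rw [PySem.Dict.items_eq_map_keys _ (pvByLenKeysNodup valss) PySem.Set.empty]
      exact List.mem_map.mpr ⟨PySem.Str.len kw, hLk, rfl⟩
    obtain ⟨i, hi, hslice⟩ := (pvWindowIff text kw (PySem.Str.len kw) rfl).mpr hin
    refine Or.inr ⟨_, hlg, i, hi, ?_, hslice.symm⟩
    rw [hslice]
    exact (PySem.Set.contains_iff _ _).mpr
      ((pvByLenMem valss _ kw).mpr ⟨rfl, kws, hkws, hkw⟩)

-- ===== VERDICT (by name: the statement is the Claim_ definition above) =====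
theorem match_vocab_py_spec : Claim_equal_match_vocab_py := by
  intro text vocab _
  unfold Spec_match_vocab_py match_vocab_py match_vocab_py_alt
  set d := PySem.Dict.ofList vocab with hd
  have hnd : d.keys.Nodup := PySem.Dict.nodup_keys_ofList vocab
  set p : String → Bool := fun k => (d.getD k []).any (fun kw => PySem.Str.isIn kw text) with hp
  -- A's fold is a filter of the sorted keys
  have hA : (PySem.List.sorted d.keys (fun x => x) false).foldl
      (fun tags tag => if pvHitLoop text (d.getD tag []) then tags ++ [tag] else tags) []
      = (PySem.List.sorted d.keys (fun x => x) false).filter p := by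
    rw [show (fun tags tag => if pvHitLoop text (d.getD tag []) then tags ++ [tag] else tags)
        = (fun tags tag => if p tag then tags ++ [tag] else tags) by
      funext tags tag; rw [pvHitLoop_eq_any, hp]]
    simpa using PySem.List.foldl_append_if p (fun x => x) (PySem.List.sorted d.keys (fun x => x) false) []
  rw [hA]
  -- the filtered sorted keys are strictly increasing
  have hsortnd : (PySem.List.sorted d.keys (fun x => x) false).Nodup :=
    ((PySem.List.sorted_perm d.keys (fun x => x) false).nodup_iff).mpr hnd
  have hlt : ((PySem.List.sorted d.keys (fun x => x) false).filter p).Pairwise (· < ·) := by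
    have hle := PySem.List.sorted_pairwise d.keys (fun x => x)
    have hall : (PySem.List.sorted d.keys (fun x => x) false).Pairwise (· < ·) :=
      (hle.and hsortnd).imp (fun h => lt_of_le_of_ne h.1 h.2)
    exact hall.sublist List.filter_sublist
  -- B's filter agrees with p on the items
  have hq : d.items.filter
        (fun pr => pr.2.any (fun kw => PySem.Set.contains (pvPresent text (pvByLen d.values)) kw))
      = d.items.filter (fun pr => p pr.1) := by
    apply List.filter_congr
    intro pr hpr
    have hv : d.getD pr.1 [] = pr.2 := PySem.Dict.getD_of_mem_items d (by simpa using hpr) hnd []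
    rw [hp]
    simp only [hv]
    apply PySem.List.any_congr_mem
    intro kw hkw
    have hvals : pr.2 ∈ d.values := List.mem_map.mpr ⟨pr, hpr, rfl⟩
    have hiff : PySem.Set.contains (pvPresent text (pvByLen d.values)) kw = true
        ↔ PySem.Str.isIn kw text = true := by
      rw [pvPresentContains]
      constructor
      · rintro ⟨_, hin⟩
        simpa using hin
      · intro hin
        exact ⟨⟨pr.2, hvals, hkw⟩, by simpa using hin⟩
    cases h1 : PySem.Set.contains (pvPresent text (pvByLen d.values)) kw
      <;> cases h2 : PySem.Str.isIn kw text <;> simp_all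
  rw [hq]
  -- project the filtered items to their keys
  have hitems : d.items = d.keys.map (fun k => (k, d.getD k [])) :=
    PySem.Dict.items_eq_map_keys d hnd []
  have hB : (d.items.filter (fun pr => p pr.1)).map (·.1) = d.keys.filter p := by
    rw [hitems, List.filter_map, List.map_map]
    simp [Function.comp_def]
  rw [hB]
  -- sorting the filtered keys IS filtering the sorted keys
  have hperm : ((PySem.List.sorted d.keys (fun x => x) false).filter p).Perm (d.keys.filter p) :=
    (PySem.List.sorted_perm d.keys (fun x => x) false).filter p
  exact (PySem.List.sorted_eq_of_perm_of_pairwise_lt _ _ _ hperm hlt).symm
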